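-- pv_equiv track=rewrite | github.com/BaptisteLoury/graphes | implement.py | calc_matrice_adj
-- ===== SOURCE A (Python) =====
-- def calc_matrice_adj(graphe):
--     card = len(graphe) # on récupère la taille du graphe (soit le nombre de sommets du graphe)
--     matrice = [[0 for x in range(card)] for y in range(card)]  # on créer une matrice carré du nombre de sommets et on la remplie de 0
--     for x in range(card): #on analyse pour chaque sommet du graphe les successeurs
--         for y in range(card):
--             if y in graphe[x]:
--                 matrice[x][y] = 1 # On ajoute dans notre matrice créée le 1 qui signifie que c'est un successeur du sommet parcouru
--
--     return matrice
-- ===== SOURCE B (Python) =====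
-- def calc_matrice_adj(graphe):
--     card = len(graphe)
--     matrice = []
--     for succs in graphe:
--         row = [0] * card
--         for y in succs:
--             if 0 <= y < card:
--                 row[y] = 1
--         matrice.append(row)
--     return matrice
-- ===== Notes on version B (the rewrite author's own statement) =====
-- stated objective: faster
-- what changed: Instead of testing 'y in graphe[x]' for every cell of the card x card matrix (a linear membership scan per cell), B builds each row once as [0]*card and walks only the successor list, setting row[y]=1 for in-range successors.
import Mathlib
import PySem

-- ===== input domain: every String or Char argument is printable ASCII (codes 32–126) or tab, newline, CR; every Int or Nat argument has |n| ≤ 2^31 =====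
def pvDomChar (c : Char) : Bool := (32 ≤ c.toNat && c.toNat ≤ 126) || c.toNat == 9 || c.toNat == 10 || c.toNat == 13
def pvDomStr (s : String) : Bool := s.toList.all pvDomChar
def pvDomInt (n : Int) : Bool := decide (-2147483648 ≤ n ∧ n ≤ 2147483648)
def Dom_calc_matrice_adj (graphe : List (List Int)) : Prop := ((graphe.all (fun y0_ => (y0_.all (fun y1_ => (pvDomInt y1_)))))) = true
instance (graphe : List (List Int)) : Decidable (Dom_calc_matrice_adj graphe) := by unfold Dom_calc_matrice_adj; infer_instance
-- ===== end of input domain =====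

-- B avoids A's per-cell membership scan: it builds each row of zeros once and marks
-- only the in-range successors of that node.

-- ===== PORT A =====
-- matrice[x][y] = v  (mutation of the nested list)
def pvSet2 (m : List (List Int)) (x y : Nat) (v : Int) : List (List Int) :=
  m.set x ((m.getD x []).set y v)

def calc_matrice_adj (graphe : List (List Int)) : List (List Int) :=
  let card := graphe.length
  let matrice := (List.range card).map (fun _ => (List.range card).map (fun _ => (0 : Int)))
  (List.range card).foldl (fun m x =>
    (List.range card).foldl (fun m (y : Nat) =>
      if ((y : Int) ∈ graphe.getD x []) then pvSet2 m x y 1 else m) m) matrice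

-- ===== PORT B =====
def calc_matrice_adj_alt (graphe : List (List Int)) : List (List Int) :=
  let card := graphe.length
  graphe.foldl (fun matrice succs =>
    matrice ++ [succs.foldl (fun row y =>
      if 0 ≤ y ∧ y < (card : Int) then row.set y.toNat 1 else row)
      (List.replicate card (0 : Int))]) []

-- ===== PRECONDITION & SPEC =====
def Spec_calc_matrice_adj (graphe : List (List Int)) (out : List (List Int)) : Prop := out = calc_matrice_adj_alt graphe
instance (graphe : List (List Int)) (out : List (List Int)) : Decidable (Spec_calc_matrice_adj graphe out) := by unfold Spec_calc_matrice_adj; infer_instance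

-- ===== CLAIM (what is proved, stated in full; the proofs are below) =====
def Claim_equal_calc_matrice_adj : Prop := ∀ (graphe : List (List Int)), Dom_calc_matrice_adj graphe → Spec_calc_matrice_adj graphe (calc_matrice_adj graphe)

-- ===== LEMMAS AND PROOFS =====

-- setting an index to the element already there is the identity
theorem pv_set_getD_self (m : List (List Int)) (x : Nat) :
    m.set x (m.getD x []) = m := by
  by_cases hx : x < m.length
  · rw [List.getD_eq_getElem m [] hx]
    exact List.set_getElem_self ..
  · exact List.set_eq_of_length_le (by omega)

-- getD of a set at the same index
theorem pv_getD_set_self (m : List (List Int)) (x : Nat) (r : List Int)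
    (hx : x < m.length) :
    (m.set x r).getD x [] = r := by
  rw [List.getD_eq_getElem _ [] (by simpa using hx), List.getElem_set, if_pos rfl]

-- A's inner loop only mutates row x: it equals a row-level fold spliced back in
theorem pv_innerEq (p : Nat → Prop) [DecidablePred p] (x : Nat) (ys : List Nat)
    (m : List (List Int)) :
    ys.foldl (fun m y => if p y then pvSet2 m x y 1 else m) m
      = m.set x (ys.foldl (fun r y => if p y then r.set y 1 else r) (m.getD x [])) := by
  induction ys generalizing m with
  | nil =>
    simp only [List.foldl_nil]
    exact (pv_set_getD_self m x).symm
  | cons y ys ih =>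
    simp only [List.foldl_cons]
    by_cases hp : p y
    · simp only [if_pos hp]
      rw [ih]
      have hget : (pvSet2 m x y 1).getD x [] = (m.getD x []).set y 1 := by
        by_cases hx : x < m.length
        · exact pv_getD_set_self m x _ hx
        · unfold pvSet2
          rw [List.set_eq_of_length_le (by omega)]
          have h1 : m.getD x [] = [] := by
            rw [List.getD_eq_getElem?_getD, List.getElem?_eq_none (by omega : m.length ≤ x)]
            rfl
          rw [h1]
          rfl
      rw [hget]
      unfold pvSet2
      rw [List.set_set]
    · simp only [if_neg hp]
      exact ih m

-- a fold of self-updates preserves the matrix length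
theorem pv_foldl_set_length (f : Nat → List Int → List Int) (ys : List Nat)
    (m : List (List Int)) :
    (ys.foldl (fun m x => m.set x (f x (m.getD x []))) m).length = m.length := by
  induction ys generalizing m with
  | nil => rfl
  | cons y ys ih =>
    simp only [List.foldl_cons]
    rw [ih, List.length_set]

-- characterization of the outer fold: row i is rewritten from the ORIGINAL row i
theorem pv_outerChar (f : Nat → List Int → List Int) (n : Nat) (m : List (List Int))
    (i : Nat) (hi : i < m.length) :
    ((List.range n).foldl (fun m x => m.set x (f x (m.getD x []))) m).getD i []
      = if i < n then f i (m.getD i []) else m.getD i [] := by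
  induction n generalizing i with
  | zero => simp
  | succ n ih =>
    rw [List.range_succ, List.foldl_append, List.foldl_cons, List.foldl_nil]
    set prev := (List.range n).foldl (fun m x => m.set x (f x (m.getD x []))) m with hprev
    have hlen : prev.length = m.length := pv_foldl_set_length f _ m
    have hgn : prev.getD n [] = m.getD n [] := by
      by_cases hn : n < m.length
      · rw [ih n hn, if_neg (lt_irrefl n)]
      · have h1 : prev.getD n [] = [] := by
          rw [List.getD_eq_getElem?_getD, List.getElem?_eq_none (by omega : prev.length ≤ n)]
          rfl
        have h2 : m.getD n [] = [] := by
          rw [List.getD_eq_getElem?_getD, List.getElem?_eq_none (by omega : m.length ≤ n)]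
          rfl
        rw [h1, h2]
    by_cases hin : i = n
    · subst hin
      rw [pv_getD_set_self prev i _ (by omega), hgn, if_pos (Nat.lt_succ_self i)]
    · rw [List.getD_eq_getElem _ [] (by simp only [List.length_set]; omega),
          List.getElem_set, if_neg (Ne.symm hin),
          ← List.getD_eq_getElem prev [] (by omega : i < prev.length), ih i hi]
      by_cases h : i < n
      · rw [if_pos h, if_pos (by omega)]
      · rw [if_neg h, if_neg (by omega)]

-- row-level folds preserve length
theorem pv_rowfold_length (p : Nat → Prop) [DecidablePred p] (ys : List Nat)
    (r : List Int) :
    (ys.foldl (fun r y => if p y then r.set y 1 else r) r).length = r.length := by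
  induction ys generalizing r with
  | nil => rfl
  | cons y ys ih =>
    simp only [List.foldl_cons]
    by_cases hp : p y
    · rw [if_pos hp, ih, List.length_set]
    · rw [if_neg hp]; exact ih r

-- characterization of A's row fold (over range n, membership test per cell)
theorem pv_rowA_char (p : Nat → Prop) [DecidablePred p] (n : Nat) (r : List Int)
    (j : Nat) (hj : j < r.length) :
    (((List.range n).foldl (fun r y => if p y then r.set y 1 else r) r).getD j 0)
      = if j < n ∧ p j then 1 else r.getD j 0 := by
  induction n with
  | zero => simp
  | succ n ih =>
    rw [List.range_succ, List.foldl_append, List.foldl_cons, List.foldl_nil]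
    set prev := (List.range n).foldl (fun r y => if p y then r.set y 1 else r) r with hprev
    have hlen : prev.length = r.length := pv_rowfold_length p _ r
    by_cases hp : p n
    · rw [if_pos hp]
      by_cases hjn : j = n
      · subst hjn
        rw [List.getD_eq_getElem _ 0 (by simp only [List.length_set]; omega),
            List.getElem_set, if_pos rfl, if_pos ⟨Nat.lt_succ_self j, hp⟩]
      · rw [List.getD_eq_getElem _ 0 (by simp only [List.length_set]; omega),
            List.getElem_set, if_neg (Ne.symm hjn),
            ← List.getD_eq_getElem prev 0 (by omega : j < prev.length), ih]
        by_cases h : j < n ∧ p j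
        · rw [if_pos h, if_pos ⟨by omega, h.2⟩]
        · rw [if_neg h, if_neg (by
            rintro ⟨h1, h2⟩
            exact h ⟨by omega, h2⟩)]
    · rw [if_neg hp, ih]
      by_cases h : j < n ∧ p j
      · rw [if_pos h, if_pos ⟨by omega, h.2⟩]
      · rw [if_neg h, if_neg (by
          rintro ⟨h1, h2⟩
          have hjn : j ≠ n := fun e => hp (e ▸ h2)
          exact h ⟨by omega, h2⟩)]

-- B's row fold preserves length
theorem pv_rowB_length (card : Nat) (ys : List Int) (r : List Int) :
    (ys.foldl (fun row y => if 0 ≤ y ∧ y < (card : Int) then row.set y.toNat 1 else row) r).length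
      = r.length := by
  induction ys generalizing r with
  | nil => rfl
  | cons y ys ih =>
    simp only [List.foldl_cons]
    by_cases hp : 0 ≤ y ∧ y < (card : Int)
    · rw [if_pos hp, ih, List.length_set]
    · rw [if_neg hp]; exact ih r

-- characterization of B's row fold (over the successor list)
theorem pv_rowB_char (card : Nat) (ys : List Int) (r : List Int)
    (hr : r.length = card) (j : Nat) (hj : j < card) :
    ((ys.foldl (fun row y => if 0 ≤ y ∧ y < (card : Int) then row.set y.toNat 1 else row) r).getD j 0)
      = if (j : Int) ∈ ys then 1 else r.getD j 0 := by
  induction ys generalizing r with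
  | nil => simp
  | cons y ys ih =>
    simp only [List.foldl_cons, List.mem_cons]
    by_cases hp : 0 ≤ y ∧ y < (card : Int)
    · rw [if_pos hp, ih _ (by rw [List.length_set]; exact hr)]
      by_cases hmem : (j : Int) ∈ ys
      · rw [if_pos hmem, if_pos (Or.inr hmem)]
      · rw [if_neg hmem]
        by_cases hjy : (j : Int) = y
        · have hjt : y.toNat = j := by omega
          rw [List.getD_eq_getElem _ 0 (by rw [List.length_set]; omega), hjt,
              List.getElem_set, if_pos rfl, if_pos (Or.inl hjy)]
        · have hne : y.toNat ≠ j := by omega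
          rw [List.getD_eq_getElem _ 0 (by rw [List.length_set]; omega),
              List.getElem_set, if_neg hne,
              ← List.getD_eq_getElem r 0 (by omega : j < r.length),
              if_neg (by
                rintro (h | h)
                · exact hjy h
                · exact hmem h)]
    · rw [if_neg hp, ih r hr]
      by_cases hmem : (j : Int) ∈ ys
      · rw [if_pos hmem, if_pos (Or.inr hmem)]
      · rw [if_neg hmem, if_neg (by
          rintro (h | h)
          · exact hp ⟨by omega, by omega⟩
          · exact hmem h)]

-- B's accumulator fold is a map
theorem pv_B_map (g : List (List Int)) (card : Nat) (acc : List (List Int)) :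
    g.foldl (fun matrice succs =>
      matrice ++ [succs.foldl (fun row y =>
        if 0 ≤ y ∧ y < (card : Int) then row.set y.toNat 1 else row)
        (List.replicate card (0 : Int))]) acc
    = acc ++ g.map (fun succs => succs.foldl (fun row y =>
        if 0 ≤ y ∧ y < (card : Int) then row.set y.toNat 1 else row)
        (List.replicate card (0 : Int))) := by
  induction g generalizing acc with
  | nil => simp
  | cons s g ih => simp [List.foldl_cons, ih]

-- ===== VERDICT (by name: the statement is the Claim_ definition above) =====
theorem calc_matrice_adj_spec : Claim_equal_calc_matrice_adj := by
  intro g _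
  unfold Spec_calc_matrice_adj calc_matrice_adj calc_matrice_adj_alt
  simp only []
  set card := g.length with hcard
  have hA :
      (List.range card).foldl (fun m x =>
        (List.range card).foldl (fun m (y : Nat) =>
          if ((y : Int) ∈ g.getD x []) then pvSet2 m x y 1 else m) m)
        ((List.range card).map (fun _ => (List.range card).map (fun _ => (0 : Int))))
      = (List.range card).foldl (fun m x =>
          m.set x ((List.range card).foldl
            (fun (r : List Int) (y : Nat) =>
              if ((y : Int) ∈ g.getD x []) then r.set y 1 else r) (m.getD x [])))
        ((List.range card).map (fun _ => (List.range card).map (fun _ => (0 : Int)))) := by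
    apply PySem.List.foldl_congr_mem
    intro m x _
    exact pv_innerEq (fun y => (y : Int) ∈ g.getD x []) x (List.range card) m
  rw [hA, pv_B_map, List.nil_append]
  set init := (List.range card).map (fun _ => (List.range card).map (fun _ => (0 : Int))) with hinit
  have hinitlen : init.length = card := by simp [hinit]
  have hinitget : ∀ i, i < card → init.getD i [] = (List.range card).map (fun _ => (0 : Int)) := by
    intro i hi
    rw [List.getD_eq_getElem _ [] (by rw [hinitlen]; exact hi)]
    simp [hinit]
  apply List.ext_getElem
  · rw [pv_foldl_set_length
          (fun x r => (List.range card).foldl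
            (fun (r : List Int) (y : Nat) =>
              if ((y : Int) ∈ g.getD x []) then r.set y 1 else r) r)
          (List.range card) init, hinitlen, List.length_map]
  · intro i h1 h2
    have hic : i < card := by rw [List.length_map] at h2; exact h2
    have hrowA := pv_outerChar
      (fun x r => (List.range card).foldl
        (fun (r : List Int) (y : Nat) =>
          if ((y : Int) ∈ g.getD x []) then r.set y 1 else r) r)
      card init i (by rw [hinitlen]; exact hic)
    rw [if_pos hic, hinitget i hic] at hrowA
    rw [← List.getD_eq_getElem _ [] h1, hrowA, List.getElem_map]
    apply List.ext_getElem
    · rw [pv_rowfold_length (fun y => (y : Int) ∈ g.getD i []), List.length_map,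
          List.length_range, pv_rowB_length, List.length_replicate]
    · intro j hj1 hj2
      have hjc : j < card := by
        rw [pv_rowB_length, List.length_replicate] at hj2; exact hj2
      have hAj := pv_rowA_char (fun y => (y : Int) ∈ g.getD i []) card
        ((List.range card).map (fun _ => (0 : Int))) j (by simp [hjc])
      have hBj := pv_rowB_char card (g[i]) (List.replicate card (0 : Int))
        List.length_replicate j hjc
      rw [← List.getD_eq_getElem _ 0 hj1, ← List.getD_eq_getElem _ 0 hj2, hAj, hBj]
      have hgg : g.getD i [] = g[i] := List.getD_eq_getElem g [] hic
      rw [hgg]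
      have hz : ((List.range card).map (fun _ => (0 : Int))).getD j 0 = 0 := by
        rw [List.getD_eq_getElem _ 0 (by simp [hjc])]; simp
      have hz2 : (List.replicate card (0 : Int)).getD j 0 = 0 := by
        rw [List.getD_eq_getElem _ 0 (by simp [hjc])]; simp
      rw [hz, hz2]
      by_cases hm : (j : Int) ∈ g[i]
      · rw [if_pos ⟨hjc, hm⟩, if_pos hm]
      · rw [if_neg (by rintro ⟨_, h⟩; exact hm h), if_neg hm]
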